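-- pv_equiv track=rewrite | github.com/JohannesBuchner/BXA | bxa/xspec/gof.py | build
-- ===== SOURCE A (Python) =====
-- def build(options, k):
-- 	if len(options) == 1:
-- 		o = options[0]
-- 		if k < len(o):
-- 			#print 'yielding kth option', k, o
-- 			yield [o[k]]
-- 	else:
-- 		for i, o in enumerate(options[0]):
-- 			if i > k:
-- 				break
-- 			for p in build(options[1:], k - i):
-- 				yield [o] + p
-- ===== SOURCE B (Python) =====
-- def build(options, k):
--     # Iterative level-by-level frontier instead of A's recursive generator.
--     *rest, last = options
--     frontier = [([], k)]
--     for o in rest: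
--         frontier = [(p + [o[i]], r - i)
--                     for (p, r) in frontier
--                     for i in range(min(len(o), r + 1))]
--     return [p + [last[r]] for (p, r) in frontier if 0 <= r < len(last)]
-- ===== Notes on version B (the rewrite author's own statement) =====
-- stated objective: alternative
-- what changed: Replaces A's recursive generator (which re-slices options[1:] at every level) by an iterative level-by-level frontier of (partial, remaining-sum) pairs, built left to right with list comprehensions and filtered at the last level.
-- intended difference: On a single option list with negative k (and -len<=k so A returns), A's base case 'k < len(o)' lets Python's negative indexing yield the wrap-around element [[o[k]]], while B returns [] -- the intended value, since no non-negative index sums to a negative k. — e.g. on build([[5, 6]], -1): A returns [[6]], B returns []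
import Mathlib
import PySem

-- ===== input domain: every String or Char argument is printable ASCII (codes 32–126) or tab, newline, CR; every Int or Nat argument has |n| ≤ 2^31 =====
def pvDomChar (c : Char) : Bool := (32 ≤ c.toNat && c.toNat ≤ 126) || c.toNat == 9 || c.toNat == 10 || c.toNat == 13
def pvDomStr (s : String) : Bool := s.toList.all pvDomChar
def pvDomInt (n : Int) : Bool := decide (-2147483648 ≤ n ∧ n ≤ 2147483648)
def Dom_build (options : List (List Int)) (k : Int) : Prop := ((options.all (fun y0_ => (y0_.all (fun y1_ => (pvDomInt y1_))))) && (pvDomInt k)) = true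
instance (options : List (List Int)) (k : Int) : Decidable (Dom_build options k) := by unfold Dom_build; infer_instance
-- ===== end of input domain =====

-- B replaces A's recursive generator by an iterative level-by-level frontier (different decomposition);
-- the equivalence is about the yielded values collected in order (A is a generator, B returns a list).

-- ===== PORT A =====
-- A's generator, collected into a list in yield order; 'for i,o in enumerate(options[0]): if i > k: break'
-- is the takeWhile prefix of the enumeration (indices strictly increase, so break = takeWhile).
def build : List (List Int) → Int → List (List Int)
  | [], _ => []            -- Python: IndexError on options[0]; excluded by Pre_build
  | o :: rest, k =>
    if rest.isEmpty then   -- len(options) == 1, with o = options[0]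
      if k < (o.length : Int) then
        match PySem.List.pyGet? o k with
        | some v => [[v]]
        | none => []       -- Python: IndexError (k < -len(o)); excluded by Pre_build
      else []
    else
      ((PySem.List.enumerate o).takeWhile (fun ix => decide (ix.1 ≤ k))).flatMap
        (fun ix => (build rest (k - ix.1)).map (fun p => ix.2 :: p))

-- ===== PORT B =====
-- helper: one level of Source B's frontier comprehension
def bStep (fr : List (List Int × Int)) (o : List Int) : List (List Int × Int) :=
  fr.flatMap (fun pr =>
    (PySem.List.pyRange 0 (min (o.length : Int) (pr.2 + 1)) 1).map
      (fun i => (pr.1 ++ [PySem.List.pyGetD o i 0], pr.2 - i)))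

-- helper: Source B's final comprehension over the last option list
def bFinal (last : List Int) (fr : List (List Int × Int)) : List (List Int) :=
  (fr.filter (fun pr => decide (0 ≤ pr.2) && decide (pr.2 < (last.length : Int)))).map
    (fun pr => pr.1 ++ [PySem.List.pyGetD last pr.2 0])

def build_alt (options : List (List Int)) (k : Int) : List (List Int) :=
  match options.getLast? with
  | none => []             -- Python: ValueError on '*rest, last = options'; excluded by Pre_build
  | some last => bFinal last (options.dropLast.foldl bStep [(([] : List Int), k)])

-- ===== PRECONDITION & SPEC =====
-- Pre_ excludes exactly the inputs where A raises IndexError: empty options, and a single option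
-- list with k < -len(options[0]).  (B raises there too: ValueError / IndexError.)
def Pre_build (options : List (List Int)) (k : Int) : Prop :=
  options ≠ [] ∧ (options.length = 1 → -(((options.headD []).length : Int)) ≤ k)
instance (options : List (List Int)) (k : Int) : Decidable (Pre_build options k) := by unfold Pre_build; infer_instance
def pvWitness_build : List (List Int) × Int := ([[0, 1], [0]], 1)

-- On a single option list with -len(o) ≤ k < 0, A returns the wrap-around element [[o[k]]] via Python's
-- negative indexing, while B returns [] — the intended value, since no non-negative index sums to a negative k.
def D_build (options : List (List Int)) (k : Int) : Prop := options.length = 1 ∧ k < 0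
instance (options : List (List Int)) (k : Int) : Decidable (D_build options k) := by unfold D_build; infer_instance

def Spec_build (options : List (List Int)) (k : Int) (out : List (List Int)) : Prop :=
  ¬ D_build options k → out = build_alt options k
instance (options : List (List Int)) (k : Int) (out : List (List Int)) : Decidable (Spec_build options k out) := by unfold Spec_build; infer_instance

def pvDiffWitness_build : List (List Int) × Int := ([[5, 6]], -1)
def pvDiffWitnessOut_build : (List (List Int)) × (List (List Int)) := ([[6]], [])

-- ===== CLAIM (what is proved, stated in full; the proofs are below) =====
def Claim_unchanged_build : Prop := ∀ (options : List (List Int)) (k : Int), Dom_build options k → Pre_build options k → Spec_build options k (build options k)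
def Claim_changed_build : Prop := Dom_build (pvDiffWitness_build.1) (pvDiffWitness_build.2) ∧ Pre_build (pvDiffWitness_build.1) (pvDiffWitness_build.2) ∧ D_build (pvDiffWitness_build.1) (pvDiffWitness_build.2) ∧ build (pvDiffWitness_build.1) (pvDiffWitness_build.2) = pvDiffWitnessOut_build.1 ∧ build_alt (pvDiffWitness_build.1) (pvDiffWitness_build.2) = pvDiffWitnessOut_build.2 ∧ pvDiffWitnessOut_build.1 ≠ pvDiffWitnessOut_build.2
def Claim_exact_build : Prop := ∀ (options : List (List Int)) (k : Int), Dom_build options k → Pre_build options k → D_build options k → build options k ≠ build_alt options k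

-- ===== LEMMAS AND PROOFS =====

theorem build_single (o : List Int) (k : Int) :
    build [o] k = if k < (o.length : Int) then
      (match PySem.List.pyGet? o k with | some v => [[v]] | none => []) else [] := by
  simp [build]

theorem build_cons (o : List Int) (rest : List (List Int)) (h : rest ≠ []) (k : Int) :
    build (o :: rest) k =
      ((PySem.List.enumerate o).takeWhile (fun ix => decide (ix.1 ≤ k))).flatMap
        (fun ix => (build rest (k - ix.1)).map (fun p => ix.2 :: p)) := by
  simp [build, h]

theorem foldl_bStep_nil (l : List (List Int)) : l.foldl bStep [] = [] := by
  induction l with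
  | nil => rfl
  | cons o t ih => simpa [bStep] using ih

theorem foldl_bStep_append (l : List (List Int)) (a b : List (List Int × Int)) :
    l.foldl bStep (a ++ b) = l.foldl bStep a ++ l.foldl bStep b := by
  induction l generalizing a b with
  | nil => rfl
  | cons o t ih =>
    simp only [List.foldl_cons]
    rw [show bStep (a ++ b) o = bStep a o ++ bStep b o from List.flatMap_append, ih]

theorem bFinal_append (last : List Int) (a b : List (List Int × Int)) :
    bFinal last (a ++ b) = bFinal last a ++ bFinal last b := by
  simp [bFinal]

theorem bFinal_foldl_flatMap (last : List Int) (l : List (List Int)) (fr : List (List Int × Int)) :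
    bFinal last (l.foldl bStep fr) = fr.flatMap (fun pr => bFinal last (l.foldl bStep [pr])) := by
  induction fr with
  | nil => simp [foldl_bStep_nil, bFinal]
  | cons pr t ih =>
    have h1 : pr :: t = [pr] ++ t := rfl
    rw [h1, foldl_bStep_append, bFinal_append, ih, List.flatMap_append]
    simp

theorem takeWhile_pyRange (r a b : Int) :
    (PySem.List.pyRange a b 1).takeWhile (fun j => decide (j ≤ r)) =
      PySem.List.pyRange a (min b (r + 1)) 1 := by
  by_cases hab : b ≤ a
  · rw [PySem.List.pyRange_one_eq_nil hab,
      PySem.List.pyRange_one_eq_nil (le_trans (min_le_left _ _) hab)]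
    rfl
  · have hab' : a < b := lt_of_not_ge hab
    by_cases har : a ≤ r
    · have hmin : a < min b (r + 1) := lt_min hab' (by omega)
      rw [PySem.List.pyRange_one_cons hab', List.takeWhile_cons_of_pos (by simpa using har),
        takeWhile_pyRange r (a + 1) b, PySem.List.pyRange_one_cons hmin]
    · have hmin : min b (r + 1) ≤ a := le_trans (min_le_right _ _) (by omega)
      rw [PySem.List.pyRange_one_cons hab', List.takeWhile_cons_of_neg (by simpa using har),
        PySem.List.pyRange_one_eq_nil hmin]
termination_by (b - a).toNat
decreasing_by omega

theorem enum_takeWhile (o : List Int) (r : Int) :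
    (PySem.List.enumerate o).takeWhile (fun ix => decide (ix.1 ≤ r)) =
      (PySem.List.pyRange 0 (min (o.length : Int) (r + 1)) 1).map
        (fun i => (i, PySem.List.pyGetD o i 0)) := by
  rw [PySem.List.enumerate_eq_map_pyRange o 0, List.takeWhile_map]
  rw [show ((fun ix : Int × Int => decide (ix.1 ≤ r)) ∘ fun j => (j, PySem.List.pyGetD o j 0))
      = fun j => decide (j ≤ r) from rfl]
  rw [PySem.List.len_eq, takeWhile_pyRange r 0 (o.length : Int)]

theorem bMain (rest : List (List Int)) (last : List Int) (p : List Int) (r : Int)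
    (h0 : rest = [] → 0 ≤ r) :
    bFinal last (rest.foldl bStep [(p, r)]) =
      (build (rest ++ [last]) r).map (fun q => p ++ q) := by
  induction rest generalizing p r with
  | nil =>
    have hr : 0 ≤ r := h0 rfl
    rw [List.foldl_nil, List.nil_append, build_single]
    by_cases hlt : r < (last.length : Int)
    · rw [if_pos hlt, PySem.List.pyGet?_eq_some_getElem last hr hlt]
      simp [bFinal, hr, hlt, PySem.List.pyGetD_eq_getElem last 0 hr hlt]
    · rw [if_neg hlt]
      simp [bFinal, hlt]
  | cons o rest' ih =>
    simp only [List.foldl_cons]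
    have hstep : bStep [(p, r)] o =
        (PySem.List.pyRange 0 (min (o.length : Int) (r + 1)) 1).map
          (fun i => (p ++ [PySem.List.pyGetD o i 0], r - i)) := by
      simp [bStep]
    have hcons : build ((o :: rest') ++ [last]) r =
        ((PySem.List.enumerate o).takeWhile (fun ix => decide (ix.1 ≤ r))).flatMap
          (fun ix => (build (rest' ++ [last]) (r - ix.1)).map (fun q => ix.2 :: q)) :=
      build_cons o (rest' ++ [last]) (by simp) r
    rw [hstep, bFinal_foldl_flatMap, List.flatMap_map, hcons, enum_takeWhile,
      List.map_flatMap, List.flatMap_map]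
    apply List.flatMap_congr
    intro i hi
    have hmem := (PySem.List.mem_pyRange_one).mp hi
    rw [ih (p ++ [PySem.List.pyGetD o i 0]) (r - i) (fun _ => by omega)]
    simp [Function.comp, List.map_map]

-- ===== VERDICT (by name: the statement is the Claim_ definition above) =====
theorem build_spec : Claim_unchanged_build := by
  intro options k _hdom hpre hnD
  have hne : options ≠ [] := hpre.1
  have hdecomp : options.dropLast ++ [options.getLast hne] = options :=
    List.dropLast_append_getLast hne
  have hlast : options.getLast? = some (options.getLast hne) :=
    List.getLast?_eq_some_getLast hne
  have h0 : options.dropLast = [] → 0 ≤ k := by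
    intro hd
    have hlen := congrArg List.length hdecomp
    rw [hd] at hlen
    simp at hlen
    by_contra hk
    exact hnD ⟨hlen.symm, by omega⟩
  show build options k = build_alt options k
  unfold build_alt
  rw [hlast]
  show build options k = bFinal (options.getLast hne) (options.dropLast.foldl bStep [([], k)])
  rw [bMain options.dropLast (options.getLast hne) [] k h0, hdecomp]
  simp

theorem build_changed : Claim_changed_build := by unfold Claim_changed_build; decide

theorem build_tight : Claim_exact_build := by
  intro options k _hdom hpre hD
  obtain ⟨hlen, hk⟩ := hD
  obtain ⟨o, rfl⟩ : ∃ o, options = [o] := by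
    match options, hlen with
    | [o], _ => exact ⟨o, rfl⟩
  have hge : -((o.length : Int)) ≤ k := hpre.2 (by simp)
  have hlt : k < (o.length : Int) := by omega
  have hkf : decide (0 ≤ k) = false := decide_eq_false (by omega)
  have hB : build_alt [o] k = [] := by
    unfold build_alt
    simp [bFinal, List.filter, hkf]
  rw [hB, build_single, if_pos hlt]
  cases h : PySem.List.pyGet? o k with
  | none =>
    have hnr := (PySem.List.pyGet?_eq_none_iff o k).mp h
    exact absurd (by simp [PySem.Raise.InRange]; omega) hnr
  | some v => simp
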